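-- pv_equiv track=rewrite | github.com/Bluewind8791/learning_programming | 2022/1.py | solution
-- ===== SOURCE A (Python) =====
-- import collections
--
-- def solution(id_list, report, k):
--     # 동일한 유저에 대한 신고 횟수는 1회로 처리 > report 중복 제거
--     report = set(report)
--     report = list(report)
--
--     # block 당한 유저 찾기
--     block_list = []
--     split_report = []
--
--     for i in range(len(report)):
--         split_report.append(report[i].split(" "))
--         block_list.append(report[i].split(" "))
--         del block_list[i][0]
--
--     block_list = sum(block_list, [])
--
--     counting = collections.Counter(block_list).most_common()
--
--     block_list = []
--
--     for i in range(len(counting)):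
--         if counting[i][1] >= 2:
--             block_list.append(counting[i][0])
--
--
--     # block 유저를 신고한 유저를 찾아 메일 발송 수 배열 생성
--
--     # 메일 발송 수 배열 생성
--     answer = [0] * len(id_list)
--
--     # id list 중 report[0] 가 동일한 인덱스 중 report[1]가 block list 안에 있다면 count 1 추가
--     for i in range(len(id_list)):
--         for j in range(len(split_report)):
--             if id_list[i] == split_report[j][0]:
--                 for k in block_list:
--                     if split_report[j][1] == k:
--                         answer[i] += 1
--
--     return answer
-- ===== SOURCE B (Python) =====
-- import collections
--
-- def solution(id_list, report, k):
--     # one pass with counters instead of A's triple nested loop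
--     # (note: like A, the blocking threshold is 2; A's 'for k in block_list'
--     # shadows the parameter k, so k is unused)
--     pairs = [r.split(" ") for r in dict.fromkeys(report)]
--     cnt = collections.Counter(t for p in pairs for t in p[1:])
--     good = [p[0] for p in pairs if len(p) >= 2 and cnt[p[1]] >= 2]
--     mails = collections.Counter(good)
--     return [mails[i] for i in id_list]
-- ===== Notes on version B (the rewrite author's own statement) =====
-- stated objective: faster
-- what changed: A's triple nested loop (ids x reports x blocked list) plus a Counter().most_common() sort is replaced by two counter dictionaries and a single pass over the deduplicated reports, with a final dictionary lookup per id.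
import Mathlib
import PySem

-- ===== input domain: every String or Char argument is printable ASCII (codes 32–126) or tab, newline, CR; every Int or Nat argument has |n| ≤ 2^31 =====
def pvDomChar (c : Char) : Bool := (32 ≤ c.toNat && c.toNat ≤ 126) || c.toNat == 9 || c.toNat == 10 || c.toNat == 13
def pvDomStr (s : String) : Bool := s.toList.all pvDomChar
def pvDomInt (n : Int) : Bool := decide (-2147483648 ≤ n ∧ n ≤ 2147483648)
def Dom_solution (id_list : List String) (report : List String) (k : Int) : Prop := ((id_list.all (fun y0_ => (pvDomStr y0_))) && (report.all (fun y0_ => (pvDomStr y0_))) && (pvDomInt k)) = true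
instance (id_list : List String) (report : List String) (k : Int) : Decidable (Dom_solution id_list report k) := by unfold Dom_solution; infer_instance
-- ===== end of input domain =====

-- B replaces A's triple nested loop (and the Counter().most_common() sort) by counter
-- dictionaries and a single pass over the deduplicated reports (same return value; like A,
-- the blocking threshold is the literal 2 — A's loop variable shadows the parameter k).

-- shared helper: Python's r.split(" ") (the separator is non-empty, so split? never returns none)
def pvSplit (r : String) : List String := (PySem.Str.split? r " ").getD []

-- ===== PORT A =====
-- 'report = list(set(report))': A's result does not depend on Python's set iteration order
-- (it is a per-reporter count over the set's members), so the port uses first-insertion order.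
def solution (id_list : List String) (report : List String) (k : Int) : List Int :=
  let report := PySem.Set.ofList report
  -- for i in range(len(report)): split_report.append(report[i].split(" "));
  --   block_list.append(report[i].split(" ")); del block_list[i][0]  (append then delete the head = append the tail)
  let st := (PySem.List.pyRange 0 (PySem.List.len report)).foldl
      (fun (st : List (List String) × List (List String)) i =>
        let r := PySem.List.pyGetD report i ""
        (st.1 ++ [pvSplit r], st.2 ++ [(pvSplit r).drop 1]))
      ([], [])
  let split_report := st.1
  let block_list := st.2.flatten  -- sum(block_list, [])
  -- collections.Counter(block_list).most_common(): the items sorted by count, descending, stable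
  let counting := PySem.List.sorted (PySem.Dict.counter block_list).items (fun p => p.2) true
  let block_list2 := (PySem.List.pyRange 0 (PySem.List.len counting)).foldl
      (fun acc i =>
        let c := PySem.List.pyGetD counting i ("", 0)
        if 2 ≤ c.2 then acc ++ [c.1] else acc) []
  let answer : List Int := List.replicate id_list.length 0
  (PySem.List.pyRange 0 (PySem.List.len id_list)).foldl
    (fun answer i =>
      (PySem.List.pyRange 0 (PySem.List.len split_report)).foldl
        (fun answer j =>
          let sr := PySem.List.pyGetD split_report j []
          if PySem.List.pyGetD id_list i "" = PySem.List.pyGetD sr 0 "" then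
            -- split_report[j][1]: Python raises IndexError when len(sr) < 2 and this line is
            -- reached; exactly those inputs are excluded by Pre_solution (the "" default of
            -- pyGetD is then unreachable: the loop below is over an empty block_list2)
            block_list2.foldl (fun answer kk =>
              if PySem.List.pyGetD sr 1 "" = kk then
                PySem.List.pySetD answer i (PySem.List.pyGetD answer i 0 + 1)
              else answer) answer
          else answer)
        answer)
    answer

-- ===== PORT B =====
def solution_alt (id_list : List String) (report : List String) (k : Int) : List Int :=
  let pairs := (PySem.List.dedup report).map (fun r => pvSplit r)
  let cnt := PySem.Dict.counter ((pairs.map (fun p => p.drop 1)).flatten)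
  let good := pairs.foldl
      (fun acc p =>
        if 2 ≤ p.length ∧ (2:Int) ≤ cnt.getD (PySem.List.pyGetD p 1 "") 0 then
          acc ++ [PySem.List.pyGetD p 0 ""]
        else acc) []
  let mails := PySem.Dict.counter good
  id_list.map (fun i => mails.getD i 0)

-- ===== PRECONDITION & SPEC =====
-- helpers for Pre_ only, phrased over the characters of the input (independently of the
-- ports' code): the space-separated words of each deduplicated report and the reported (tail) words
def pvWords (r : String) : List (List Char) := PySem.Chars.splitOn r.toList [' ']
def pvPairsC (report : List String) : List (List (List Char)) :=
  (PySem.List.dedup report).map (fun r => pvWords r)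
def pvTargetsC (report : List String) : List (List Char) :=
  ((pvPairsC report).map (fun p => p.drop 1)).flatten

-- Pre_ excludes exactly the inputs on which A raises IndexError: some report entry with no
-- space whose whole text occurs in id_list, while some token is reported at least twice.
def Pre_solution (id_list : List String) (report : List String) (k : Int) : Prop :=
  ¬ ((∃ t ∈ pvTargetsC report, 2 ≤ (pvTargetsC report).count t) ∧
     (∃ p ∈ pvPairsC report, p.length < 2 ∧ PySem.List.pyGetD p 0 [] ∈ id_list.map String.toList))
instance (id_list : List String) (report : List String) (k : Int) : Decidable (Pre_solution id_list report k) := by unfold Pre_solution; infer_instance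
def pvWitness_solution : List String × List String × Int := (["a"], ["a b"], 2)

def Spec_solution (id_list : List String) (report : List String) (k : Int) (out : List Int) : Prop := out = solution_alt id_list report k
instance (id_list : List String) (report : List String) (k : Int) (out : List Int) : Decidable (Spec_solution id_list report k out) := by unfold Spec_solution; infer_instance

-- ===== CLAIM =====
def Claim_equal_solution : Prop := ∀ (id_list : List String) (report : List String) (k : Int), Dom_solution id_list report k → Pre_solution id_list report k → Spec_solution id_list report k (solution id_list report k)

-- ===== LEMMAS AND PROOFS =====

-- proof-side helpers: the same data in String form, as the ports compute it
def pvPairs (report : List String) : List (List String) :=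
  (PySem.List.dedup report).map (fun r => pvSplit r)
def pvTargets (report : List String) : List String :=
  ((pvPairs report).map (fun p => p.drop 1)).flatten

theorem pv_toList_inj : Function.Injective String.toList :=
  fun _ _ h => String.toList_injective h

theorem pv_words_bridge (r : String) : (pvSplit r).map String.toList = pvWords r := by
  have h := PySem.Str.split?_map r " "
  rw [show (" " : String).toList = [' '] from by decide] at h
  cases hs : PySem.Str.split? r " " with
  | none =>
    exfalso
    rw [hs] at h
    simp [PySem.Chars.split?] at h
  | some l =>
    rw [hs] at h
    simp only [Option.map_some] at h
    simp [PySem.Chars.split?] at h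
    unfold pvSplit pvWords
    rw [hs]
    simpa using h

theorem pv_pairsC_bridge (report : List String) :
    pvPairsC report = (pvPairs report).map (fun p => p.map String.toList) := by
  unfold pvPairsC pvPairs
  rw [List.map_map]
  apply List.map_congr_left
  intro r _
  exact (pv_words_bridge r).symm

theorem pv_targetsC_bridge (report : List String) :
    pvTargetsC report = (pvTargets report).map String.toList := by
  unfold pvTargetsC pvTargets
  rw [pv_pairsC_bridge, List.map_map, List.map_flatten, List.map_map]
  congr 1
  apply List.map_congr_left
  intro p _
  simp [List.map_drop]

theorem pv_count_bridge (report : List String) (t : String) :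
    (pvTargetsC report).count t.toList = (pvTargets report).count t := by
  rw [pv_targetsC_bridge]
  exact List.count_map_of_injective _ _ pv_toList_inj t

theorem pv_get_map (q : List String) (i : Int) :
    PySem.List.pyGetD (q.map String.toList) i [] = (PySem.List.pyGetD q i "").toList := by
  have h := PySem.List.pyGetD_map (f := String.toList) (xs := q) (i := i) (d := "")
  simpa using h

theorem pv_Pre_iff (id_list report : List String) (k : Int) :
    Pre_solution id_list report k ↔
      ¬ ((∃ t ∈ pvTargets report, 2 ≤ (pvTargets report).count t) ∧
         (∃ p ∈ pvPairs report, p.length < 2 ∧ PySem.List.pyGetD p 0 "" ∈ id_list)) := by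
  unfold Pre_solution
  apply not_congr
  apply and_congr
  · constructor
    · rintro ⟨t, ht, hc⟩
      rw [pv_targetsC_bridge] at ht
      obtain ⟨s, hs, rfl⟩ := List.mem_map.mp ht
      exact ⟨s, hs, by rwa [pv_count_bridge] at hc⟩
    · rintro ⟨s, hs, hc⟩
      refine ⟨s.toList, ?_, by rwa [pv_count_bridge]⟩
      rw [pv_targetsC_bridge]
      exact List.mem_map_of_mem hs
  · rw [pv_pairsC_bridge]
    constructor
    · rintro ⟨p, hp, hlt, hmem⟩
      obtain ⟨q, hq, rfl⟩ := List.mem_map.mp hp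
      refine ⟨q, hq, by simpa using hlt, ?_⟩
      rw [pv_get_map] at hmem
      exact (List.mem_map_of_injective pv_toList_inj).mp hmem
    · rintro ⟨q, hq, hlt, hmem⟩
      refine ⟨q.map String.toList, List.mem_map_of_mem hq, by simpa using hlt, ?_⟩
      rw [pv_get_map]
      exact (List.mem_map_of_injective pv_toList_inj).mpr hmem

-- the body of A's outer loop after the j-range is turned into a fold over split_report itself
def pvBody (id_list : List String) (ps : List (List String)) (bl : List String)
    (ans : List Int) (i : Int) : List Int :=
  ps.foldl (fun ans sr =>
    if PySem.List.pyGetD id_list i "" = PySem.List.pyGetD sr 0 "" then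
      bl.foldl (fun ans kk =>
        if PySem.List.pyGetD sr 1 "" = kk then
          PySem.List.pySetD ans i (PySem.List.pyGetD ans i 0 + 1)
        else ans) ans
    else ans) ans

-- the net amount A adds at index i of answer
def pvS (id_list : List String) (ps : List (List String)) (bl : List String) (i : Int) : Int :=
  (ps.map (fun sr =>
    if PySem.List.pyGetD id_list i "" = PySem.List.pyGetD sr 0 "" then
      (bl.count (PySem.List.pyGetD sr 1 "") : Int)
    else 0)).sum

theorem pv_set_get (a : List Int) (m : Nat) (h : m < a.length) :
    PySem.List.pySetD a (m : Int) (PySem.List.pyGetD a (m : Int) 0 + 0) = a := by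
  simp [PySem.List.pySetD_natCast, PySem.List.pyGetD_natCast, List.getD_eq_getElem?_getD,
    List.getElem?_eq_getElem h, List.set_getElem_self]

theorem pv_inner (t : String) (m : Nat) (i : Int) (hi : i = (m : Int)) (bl : List String) :
    ∀ (a : List Int), m < a.length →
      bl.foldl (fun ans kk =>
        if t = kk then PySem.List.pySetD ans i (PySem.List.pyGetD ans i 0 + 1) else ans) a
      = PySem.List.pySetD a i (PySem.List.pyGetD a i 0 + (bl.count t : Int)) := by
  subst hi
  induction bl with
  | nil => intro a ha; simpa using (pv_set_get a m ha).symm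
  | cons kk bl ih =>
    intro a ha
    simp only [List.foldl_cons, List.count_cons]
    by_cases h : t = kk
    · simp only [if_pos h]
      rw [ih _ (by simp [PySem.List.length_pySetD, ha])]
      have hkk : (kk == t) = true := by simp [h.symm]
      rw [PySem.List.pySetD_natCast, PySem.List.pySetD_natCast, PySem.List.pySetD_natCast,
        List.set_set]
      have hg : PySem.List.pyGetD (a.set m (PySem.List.pyGetD a (m : Int) 0 + 1)) (m : Int) 0
          = PySem.List.pyGetD a (m : Int) 0 + 1 := by
        rw [← PySem.List.pySetD_natCast, PySem.List.pyGetD_pySetD_natCast _ _ _ _ _ ha]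
        simp
      rw [hg]
      simp only [hkk, if_pos]
      congr 1
      push_cast
      ring
    · simp only [if_neg h]
      rw [ih _ ha]
      have hkk : (kk == t) = false := by simp [Ne.symm h]
      simp [hkk]

theorem pv_middle (id_list : List String) (bl : List String) (m : Nat) (i : Int)
    (hi : i = (m : Int)) (ps : List (List String)) :
    ∀ (a : List Int), m < a.length →
      pvBody id_list ps bl a i
        = PySem.List.pySetD a i (PySem.List.pyGetD a i 0 + pvS id_list ps bl i) := by
  subst hi
  induction ps with
  | nil => intro a ha; simpa [pvBody, pvS] using (pv_set_get a m ha).symm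
  | cons sr ps ih =>
    intro a ha
    by_cases h : PySem.List.pyGetD id_list (m : Nat) "" = PySem.List.pyGetD sr 0 ""
    · have hstep := pv_inner (PySem.List.pyGetD sr 1 "") m (m : Int) rfl bl a ha
      unfold pvBody
      simp only [List.foldl_cons, if_pos h]
      rw [hstep]
      have ihb := ih (PySem.List.pySetD a (m : Int)
          (PySem.List.pyGetD a (m : Int) 0 + (bl.count (PySem.List.pyGetD sr 1 "") : Int)))
        (by rw [PySem.List.length_pySetD]; exact ha)
      unfold pvBody at ihb
      rw [ihb]
      rw [PySem.List.pySetD_natCast, PySem.List.pySetD_natCast, PySem.List.pySetD_natCast,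
        List.set_set]
      have hg : PySem.List.pyGetD
          (a.set m (PySem.List.pyGetD a (m : Int) 0 + (bl.count (PySem.List.pyGetD sr 1 "") : Int))) (m : Int) 0
          = PySem.List.pyGetD a (m : Int) 0 + (bl.count (PySem.List.pyGetD sr 1 "") : Int) := by
        rw [← PySem.List.pySetD_natCast, PySem.List.pyGetD_pySetD_natCast _ _ _ _ _ ha]
        simp
      rw [hg]
      unfold pvS
      simp only [List.map_cons, List.sum_cons, if_pos h]
      congr 1
      ring
    · unfold pvBody
      simp only [List.foldl_cons, if_neg h]
      have ihb := ih a ha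
      unfold pvBody at ihb
      rw [ihb]
      unfold pvS
      simp only [List.map_cons, List.sum_cons, if_neg h]
      congr 1
      ring

theorem pv_body_len (id_list : List String) (ps : List (List String)) (bl : List String) :
    ∀ (a : List Int) (i : Int), (pvBody id_list ps bl a i).length = a.length := by
  intro a i
  rw [pvBody]
  induction ps generalizing a with
  | nil => rfl
  | cons sr ps ih =>
    simp only [List.foldl_cons]
    by_cases h : PySem.List.pyGetD id_list i "" = PySem.List.pyGetD sr 0 ""
    · simp only [if_pos h]
      rw [ih]
      clear ih
      induction bl generalizing a with
      | nil => rfl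
      | cons kk bl ihb =>
        simp only [List.foldl_cons]
        by_cases hk : PySem.List.pyGetD sr 1 "" = kk
        · simp only [if_pos hk]; rw [ihb]; exact PySem.List.length_pySetD _ _ _
        · simp only [if_neg hk]; exact ihb a
    · simp only [if_neg h]; exact ih a

theorem pv_outer_len (id_list : List String) (ps : List (List String)) (bl : List String)
    (L : List Int) : ∀ (a : List Int), (L.foldl (pvBody id_list ps bl) a).length = a.length := by
  induction L with
  | nil => intro a; rfl
  | cons i L ih => intro a; simp only [List.foldl_cons]; rw [ih, pv_body_len]

theorem pv_outer (id_list : List String) (ps : List (List String)) (bl : List String)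
    (n : Nat) : ∀ (d c : Nat) (a : List Int), a.length = n → n ≤ c + d →
    ∀ (m : Nat), m < n →
      PySem.List.pyGetD ((PySem.List.pyRange (c : Int) (n : Int)).foldl (pvBody id_list ps bl) a) (m : Int) 0
      = if c ≤ m then PySem.List.pyGetD a (m : Int) 0 + pvS id_list ps bl (m : Int)
        else PySem.List.pyGetD a (m : Int) 0 := by
  intro d
  induction d with
  | zero =>
    intro c a hlen hc m hm
    have hr : PySem.List.pyRange (c : Int) (n : Int) = [] := by
      rw [PySem.List.pyRange_one]
      have : ((n : Int) - c).toNat = 0 := by omega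
      simp [this]
    rw [hr]
    simp only [List.foldl_nil]
    rw [if_neg (by omega)]
  | succ d ih =>
    intro c a hlen hc m hm
    by_cases hcn : c < n
    · have hr : PySem.List.pyRange (c : Int) (n : Int)
          = (c : Int) :: PySem.List.pyRange ((c : Int) + 1) (n : Int) := by
        exact PySem.List.pyRange_one_cons (by exact_mod_cast hcn)
      rw [hr]
      simp only [List.foldl_cons]
      have hc1 : ((c : Int) + 1) = ((c + 1 : Nat) : Int) := by push_cast; ring
      have hstep := pv_middle id_list bl c ((c : Nat) : Int) rfl ps a (by omega)
      rw [hstep, hc1]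
      have hlen' : (PySem.List.pySetD a (c : Int) (PySem.List.pyGetD a (c : Int) 0 + pvS id_list ps bl (c : Int))).length = n := by
        rw [PySem.List.length_pySetD]; exact hlen
      rw [ih (c + 1) _ hlen' (by omega) m hm]
      have hget : PySem.List.pyGetD (PySem.List.pySetD a (c : Int) (PySem.List.pyGetD a (c : Int) 0 + pvS id_list ps bl (c : Int))) (m : Int) 0
          = if m = c then PySem.List.pyGetD a (c : Int) 0 + pvS id_list ps bl (c : Int)
            else PySem.List.pyGetD a (m : Int) 0 :=
        PySem.List.pyGetD_pySetD_natCast _ _ _ _ _ (by omega)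
      rw [hget]
      by_cases hmc : m = c
      · subst hmc
        rw [if_neg (show ¬ (m + 1 ≤ m) by omega), if_pos (show m = m from rfl),
          if_pos (show m ≤ m by omega)]
      · rw [if_neg hmc]
        by_cases h1 : c + 1 ≤ m
        · rw [if_pos h1, if_pos (by omega)]
        · rw [if_neg h1, if_neg (by omega)]
    · have hr : PySem.List.pyRange (c : Int) (n : Int) = [] := by
        rw [PySem.List.pyRange_one]
        have : ((n : Int) - c).toNat = 0 := by omega
        simp [this]
      rw [hr]
      simp only [List.foldl_nil]
      rw [if_neg (by omega)]

-- A's filtered most_common list, as filter-and-map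
theorem pv_append_if_char (L : List (String × Int)) :
    (PySem.List.pyRange 0 (PySem.List.len L)).foldl
      (fun acc i =>
        let c := PySem.List.pyGetD L i ("", 0)
        if 2 ≤ c.2 then acc ++ [c.1] else acc) []
    = (L.filter (fun c => decide (2 ≤ c.2))).map Prod.fst := by
  rw [PySem.List.foldl_pyRange_pyGetD L ("", 0)
    (fun acc c => if 2 ≤ c.2 then acc ++ [c.1] else acc) [] (by norm_num)]
  have hb : (fun (acc : List String) (c : String × Int) => if 2 ≤ c.2 then acc ++ [c.1] else acc)
      = fun acc c => if (fun (c : String × Int) => decide (2 ≤ c.2)) c = true then acc ++ [Prod.fst c] else acc := by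
    funext acc c; simp
  rw [hb, PySem.List.foldl_append_if]
  simp

-- membership in A's block list = reported at least twice
theorem pv_bl2_mem (T : List String) (t : String) :
    t ∈ ((PySem.List.sorted (PySem.Dict.counter T).items (fun p => p.2) true).filter
          (fun c => decide (2 ≤ c.2))).map Prod.fst
      ↔ 2 ≤ T.count t := by
  constructor
  · intro ht
    obtain ⟨c, hc, rfl⟩ := List.mem_map.mp ht
    obtain ⟨hcm, hcd⟩ := List.mem_filter.mp hc
    rw [PySem.List.mem_sorted, PySem.Dict.items_counter] at hcm
    obtain ⟨u, hu, rfl⟩ := List.mem_map.mp hcm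
    simp only [decide_eq_true_eq] at hcd
    exact_mod_cast hcd
  · intro h
    apply List.mem_map.mpr
    refine ⟨(t, (T.count t : Int)), List.mem_filter.mpr ⟨?_, ?_⟩, rfl⟩
    · rw [PySem.List.mem_sorted, PySem.Dict.items_counter]
      exact List.mem_map.mpr ⟨t, (PySem.Set.mem_ofList T t).mpr (List.count_pos_iff.mp (by omega)), rfl⟩
    · simp only [decide_eq_true_eq]
      exact_mod_cast h

theorem pv_bl2_nodup (T : List String) :
    (((PySem.List.sorted (PySem.Dict.counter T).items (fun p => p.2) true).filter
        (fun c => decide (2 ≤ c.2))).map Prod.fst).Nodup := by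
  have hperm : ((PySem.List.sorted (PySem.Dict.counter T).items (fun p => p.2) true).map Prod.fst).Perm
      ((PySem.Dict.counter T).items.map Prod.fst) :=
    (PySem.List.sorted_perm _ _ _).map Prod.fst
  have hnd : ((PySem.Dict.counter T).items.map Prod.fst).Nodup := by
    rw [PySem.Dict.items_counter]
    simp only [List.map_map]
    have : (Prod.fst ∘ fun k => (k, (T.count k : Int))) = id := by funext x; rfl
    rw [this, List.map_id]
    exact PySem.Set.nodup_ofList T
  have := (hperm.nodup_iff).mpr hnd
  exact this.sublist (List.Sublist.map Prod.fst List.filter_sublist)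

theorem pv_bl2_count (T : List String) (t : String) :
    ((((PySem.List.sorted (PySem.Dict.counter T).items (fun p => p.2) true).filter
        (fun c => decide (2 ≤ c.2))).map Prod.fst).count t : Int)
      = if (2:Int) ≤ (T.count t : Int) then 1 else 0 := by
  by_cases h : 2 ≤ T.count t
  · rw [List.count_eq_one_of_mem (pv_bl2_nodup T) ((pv_bl2_mem T t).mpr h)]
    rw [if_pos (by exact_mod_cast h)]
    rfl
  · rw [List.count_eq_zero_of_not_mem (fun hc => h ((pv_bl2_mem T t).mp hc))]
    rw [if_neg (by exact_mod_cast h)]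
    rfl

-- characterization of A's port
theorem solution_char (id_list report : List String) (k : Int) :
    solution id_list report k =
      id_list.map (fun id =>
        (List.countP (fun p => decide (id = PySem.List.pyGetD p 0 "") &&
            decide ((2:Int) ≤ ((pvTargets report).count (PySem.List.pyGetD p 1 "") : Int)))
          (pvPairs report) : Int)) := by
  have h0 : solution id_list report k =
      (PySem.List.pyRange 0 (PySem.List.len id_list)).foldl
        (pvBody id_list (pvPairs report)
          (((PySem.List.sorted (PySem.Dict.counter (pvTargets report)).items (fun p => p.2) true).filter
              (fun c => decide (2 ≤ c.2))).map Prod.fst))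
        (List.replicate id_list.length 0) := by
    show (let report' := PySem.Set.ofList report
         let st := (PySem.List.pyRange 0 (PySem.List.len report')).foldl
            (fun (st : List (List String) × List (List String)) i =>
              let r := PySem.List.pyGetD report' i ""
              (st.1 ++ [pvSplit r], st.2 ++ [(pvSplit r).drop 1])) ([], [])
         let split_report := st.1
         let block_list := st.2.flatten
         let counting := PySem.List.sorted (PySem.Dict.counter block_list).items (fun p => p.2) true
         let block_list2 := (PySem.List.pyRange 0 (PySem.List.len counting)).foldl
            (fun acc i =>
              let c := PySem.List.pyGetD counting i ("", 0)
              if 2 ≤ c.2 then acc ++ [c.1] else acc) []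
         let answer : List Int := List.replicate id_list.length 0
         (PySem.List.pyRange 0 (PySem.List.len id_list)).foldl
          (fun answer i =>
            (PySem.List.pyRange 0 (PySem.List.len split_report)).foldl
              (fun answer j =>
                let sr := PySem.List.pyGetD split_report j []
                if PySem.List.pyGetD id_list i "" = PySem.List.pyGetD sr 0 "" then
                  block_list2.foldl (fun answer kk =>
                    if PySem.List.pyGetD sr 1 "" = kk then
                      PySem.List.pySetD answer i (PySem.List.pyGetD answer i 0 + 1)
                    else answer) answer
                else answer) answer) answer) = _
    have hst : (PySem.List.pyRange 0 (PySem.List.len (PySem.Set.ofList report))).foldl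
        (fun (st : List (List String) × List (List String)) i =>
          let r := PySem.List.pyGetD (PySem.Set.ofList report) i ""
          (st.1 ++ [pvSplit r], st.2 ++ [(pvSplit r).drop 1])) ([], [])
        = (pvPairs report, (pvPairs report).map (fun p => p.drop 1)) := by
      rw [PySem.List.foldl_pyRange_pyGetD (PySem.Set.ofList report) ""
        (fun (st : List (List String) × List (List String)) r =>
          (st.1 ++ [pvSplit r], st.2 ++ [(pvSplit r).drop 1])) ([], []) (by norm_num)]
      simp only [Int.toNat_zero, List.drop_zero]
      rw [PySem.List.foldl_prod_mk (fun l r => l ++ [pvSplit r]) (fun l r => l ++ [(pvSplit r).drop 1])]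
      rw [PySem.List.foldl_append_singleton_eq_map, PySem.List.foldl_append_singleton_eq_map]
      simp only [List.nil_append]
      rw [pvPairs, PySem.List.dedup_eq_ofList, List.map_map]
      rfl
    simp only [hst]
    have htarg : ((pvPairs report).map (fun p => p.drop 1)).flatten = pvTargets report := rfl
    rw [htarg, pv_append_if_char]
    congr 1
    funext answer i
    rw [pvBody]
    rw [PySem.List.foldl_pyRange_pyGetD (pvPairs report) []
      (fun (ans : List Int) (sr : List String) =>
        if PySem.List.pyGetD id_list i "" = PySem.List.pyGetD sr 0 "" then
          (((PySem.List.sorted (PySem.Dict.counter (pvTargets report)).items (fun p => p.2) true).filter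
              (fun c => decide (2 ≤ c.2))).map Prod.fst).foldl (fun ans kk =>
            if PySem.List.pyGetD sr 1 "" = kk then
              PySem.List.pySetD ans i (PySem.List.pyGetD ans i 0 + 1)
            else ans) ans
        else ans) answer (by norm_num)]
    simp only [Int.toNat_zero, List.drop_zero]
  rw [h0]
  apply List.ext_getElem
  · rw [pv_outer_len, List.length_replicate, List.length_map]
  · intro m h1 h2
    have hm : m < id_list.length := by simpa using h2
    rw [List.getElem_map]
    have hgl : ∀ (xs : List Int) (hx : m < xs.length), xs[m]'hx = PySem.List.pyGetD xs ((m : Nat) : Int) 0 := by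
      intro xs hx
      rw [PySem.List.pyGetD_natCast, List.getD_eq_getElem]
    rw [hgl _ h1]
    have hlenid : PySem.List.len id_list = ((id_list.length : Nat) : Int) := by
      simp [PySem.List.len]
    have key := pv_outer id_list (pvPairs report)
      (((PySem.List.sorted (PySem.Dict.counter (pvTargets report)).items (fun p => p.2) true).filter
          (fun c => decide (2 ≤ c.2))).map Prod.fst)
      id_list.length id_list.length 0 (List.replicate id_list.length 0) List.length_replicate
      (by omega) m hm
    rw [if_pos (by omega)] at key
    have hrep : PySem.List.pyGetD (List.replicate id_list.length (0:Int)) ((m : Nat) : Int) 0 = 0 := by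
      rw [PySem.List.pyGetD_natCast]
      simp [List.getD_eq_getElem?_getD]
    rw [hrep, zero_add] at key
    simp only [Nat.cast_zero] at key
    rw [hlenid, key]
    have hid : PySem.List.pyGetD id_list ((m : Nat) : Int) "" = id_list[m] := by
      rw [PySem.List.pyGetD_natCast, List.getD_eq_getElem]
    rw [pvS]
    have hmap : ((pvPairs report).map (fun sr =>
        if PySem.List.pyGetD id_list ((m : Nat) : Int) "" = PySem.List.pyGetD sr 0 "" then
          ((((PySem.List.sorted (PySem.Dict.counter (pvTargets report)).items (fun p => p.2) true).filter
              (fun c => decide (2 ≤ c.2))).map Prod.fst).count (PySem.List.pyGetD sr 1 "") : Int)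
        else 0))
        = (pvPairs report).map (fun sr =>
            if (decide (id_list[m] = PySem.List.pyGetD sr 0 "") &&
               decide ((2:Int) ≤ ((pvTargets report).count (PySem.List.pyGetD sr 1 "") : Int))) = true
            then 1 else 0) := by
      apply List.map_congr_left
      intro sr _
      rw [hid, pv_bl2_count]
      by_cases hc1 : id_list[m] = PySem.List.pyGetD sr 0 ""
      · by_cases hc2 : (2:Int) ≤ ((pvTargets report).count (PySem.List.pyGetD sr 1 "") : Int)
        · simp [hc1, hc2]
        · simp [hc1, hc2]
      · simp [hc1]
    rw [hmap, PySem.List.sum_map_ite_one_zero]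

-- characterization of B's port
theorem solution_alt_char (id_list report : List String) (k : Int) :
    solution_alt id_list report k =
      id_list.map (fun id =>
        (List.countP (fun p => (PySem.List.pyGetD p 0 "" == id) &&
            decide (2 ≤ p.length ∧ (2:Int) ≤ ((pvTargets report).count (PySem.List.pyGetD p 1 "") : Int)))
          (pvPairs report) : Int)) := by
  show (let pairs := (PySem.List.dedup report).map (fun r => pvSplit r)
       let cnt := PySem.Dict.counter ((pairs.map (fun p => p.drop 1)).flatten)
       let good := pairs.foldl
          (fun acc p =>
            if 2 ≤ p.length ∧ (2:Int) ≤ cnt.getD (PySem.List.pyGetD p 1 "") 0 then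
              acc ++ [PySem.List.pyGetD p 0 ""]
            else acc) []
       let mails := PySem.Dict.counter good
       id_list.map (fun i => mails.getD i 0)) = _
  have hpairs : (PySem.List.dedup report).map (fun r => pvSplit r) = pvPairs report := rfl
  simp only [hpairs]
  have htarg : ((pvPairs report).map (fun p => p.drop 1)).flatten = pvTargets report := rfl
  rw [htarg]
  have hb : (fun (acc : List String) (p : List String) =>
      if 2 ≤ p.length ∧ (2:Int) ≤ (PySem.Dict.counter (pvTargets report)).getD (PySem.List.pyGetD p 1 "") 0 then
        acc ++ [PySem.List.pyGetD p 0 ""]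
      else acc)
      = fun acc p =>
          if (fun (p : List String) => decide (2 ≤ p.length ∧ (2:Int) ≤ ((pvTargets report).count (PySem.List.pyGetD p 1 "") : Int))) p = true then
            acc ++ [(fun (p : List String) => PySem.List.pyGetD p 0 "") p]
          else acc := by
    funext acc p
    rw [PySem.Dict.getD_counter]
    simp
  rw [hb, PySem.List.foldl_append_if]
  simp only [List.nil_append]
  apply List.map_congr_left
  intro id _
  rw [PySem.Dict.getD_counter, List.count_eq_countP, List.countP_map, List.countP_filter]
  rfl

-- ===== VERDICT =====
theorem solution_spec : Claim_equal_solution := by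
  intro id_list report k _hdom hpre
  rw [pv_Pre_iff] at hpre
  unfold Spec_solution
  rw [solution_char id_list report k, solution_alt_char]
  apply List.map_congr_left
  intro id hid
  have h : ∀ p ∈ pvPairs report,
      (decide (id = PySem.List.pyGetD p 0 "") &&
        decide ((2:Int) ≤ ((pvTargets report).count (PySem.List.pyGetD p 1 "") : Int))) = true
      ↔ ((PySem.List.pyGetD p 0 "" == id) &&
          decide (2 ≤ p.length ∧ (2:Int) ≤ ((pvTargets report).count (PySem.List.pyGetD p 1 "") : Int))) = true := by
    intro p hp
    simp only [Bool.and_eq_true, decide_eq_true_eq, beq_iff_eq]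
    constructor
    · rintro ⟨hidp, hcnt⟩
      have hcnt' : 2 ≤ (pvTargets report).count (PySem.List.pyGetD p 1 "") := by exact_mod_cast hcnt
      have hlen : 2 ≤ p.length := by
        by_contra hlt
        push_neg at hlt
        exact hpre ⟨⟨PySem.List.pyGetD p 1 "",
          List.count_pos_iff.mp (by omega), hcnt'⟩, ⟨p, hp, hlt, by rw [← hidp]; exact hid⟩⟩
      exact ⟨hidp.symm, hlen, hcnt⟩
    · rintro ⟨hidp, _, hcnt⟩
      exact ⟨hidp.symm, hcnt⟩
  have := List.countP_congr h
  exact_mod_cast this
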